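-- pv_equiv track=rewrite | github.com/ZerotakerZX/Python | TestFormulas/operators.py | task9153
-- ===== SOURCE A (Python) =====
-- def task9153(sentence):
--     l1 = list(sentence) #превращаем текст в список символов
--     repeat = [] #тут будут повторяющееся буквы
--     for i, j in zip(l1, l1[1:]): #парно сравнивая с помощью двух циклов ищем когда буквы бывают совпадают подряд
--         if i == j:
--             repeat.append(j)  #и все случаи когда буквы идёт второй раз или более записываем
--     r_element = max(set(repeat), key=repeat.count) #смотрим какой элемент в списке наиболее частый
--     return repeat.count(r_element) + 1 #и считаем сколько раз этот элемент был в списке. +1 нужен для компенсации, так как изначально в тексте искались только повторы, без первого появления знака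
-- ===== SOURCE B (Python) =====
-- def task9153(sentence):
--     # run-length encode the sentence; keep (char, run_length - 1) for runs that contain repeats
--     dups = []
--     cur = None
--     extra = 0
--     for ch in sentence:
--         if cur == ch:
--             extra += 1
--         else:
--             if extra > 0:
--                 dups.append((cur, extra))
--             cur, extra = ch, 0
--     if extra > 0:
--         dups.append((cur, extra))
--     # sort-and-sweep: sorting puts equal chars next to each other; one sweep sums each block
--     dups.sort()
--     totals = []
--     for c, k in dups:
--         if totals and totals[-1][0] == c:
--             totals[-1] = (c, totals[-1][1] + k)
--         else:
--             totals.append((c, k))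
--     return max(k for _, k in totals) + 1
-- ===== Notes on version B (the rewrite author's own statement) =====
-- stated objective: alternative
-- what changed: A collects one character per adjacent equal pair into a list and picks the winner with max over its set keyed by list.count, rescanning that list once per distinct duplicated character; B never builds that pairwise list: it run-length encodes the sentence into (char, run_length-1) records, sorts the records so equal characters become adjacent, and makes one sweep summing each equal-character block, returning the largest block sum + 1.
import Mathlib
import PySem

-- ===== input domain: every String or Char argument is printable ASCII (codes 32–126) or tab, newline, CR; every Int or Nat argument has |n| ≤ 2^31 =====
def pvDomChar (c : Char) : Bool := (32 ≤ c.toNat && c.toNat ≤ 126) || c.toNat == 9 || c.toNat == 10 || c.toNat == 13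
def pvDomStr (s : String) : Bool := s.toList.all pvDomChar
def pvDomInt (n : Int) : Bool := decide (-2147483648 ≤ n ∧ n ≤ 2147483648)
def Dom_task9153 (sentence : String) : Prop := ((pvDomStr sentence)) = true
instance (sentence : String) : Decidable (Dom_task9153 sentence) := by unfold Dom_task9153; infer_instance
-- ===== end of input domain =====

-- B replaces A's pairwise zip scan + max-by-count over its set (one list.count rescan per
-- distinct duplicated character) by run-length encoding, sorting the runs, and one sweep that sums adjacent
-- equal-character blocks of the sorted run list; the answer is the largest block sum + 1.
-- Where no consecutive duplicate exists both raise ValueError (max() of an empty collection).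

-- ===== PORT A =====
def task9153 (sentence : String) : Int :=
  let l1 := sentence.toList
  -- repeat = [j for (i, j) in zip(l1, l1[1:]) if i == j]
  let rep := (l1.zip (PySem.List.slice l1 (some 1) none)).foldl
      (fun acc pr => if pr.1 == pr.2 then acc ++ [pr.2] else acc) ([] : List Char)
  -- r_element = max(set(repeat), key=repeat.count); none = ValueError, excluded by Pre_
  match PySem.List.max? (PySem.Set.ofList rep) (fun c => (rep.count c : Int)) with
  | some r => (rep.count r : Int) + 1
  | none => 0

-- ===== PORT B =====
-- one step of B's run-length-encoding loop; state = (dups, cur, extra)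
def bStep (st : List (Char × Int) × Option Char × Int) (ch : Char) :
    List (Char × Int) × Option Char × Int :=
  if st.2.1 == some ch then
    (st.1, st.2.1, st.2.2 + 1)
  else
    ((match st.2.1 with
      | some c => if 0 < st.2.2 then st.1 ++ [(c, st.2.2)] else st.1
      | none => st.1), some ch, 0)
def bFinish (st : List (Char × Int) × Option Char × Int) : List (Char × Int) :=
  match st.2.1 with
  | some c => if 0 < st.2.2 then st.1 ++ [(c, st.2.2)] else st.1
  | none => st.1
def tStep (ts : List (Char × Int)) (p : Char × Int) : List (Char × Int) :=
  match ts.getLast? with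
  | some q => if q.1 == p.1 then ts.dropLast ++ [(p.1, q.2 + p.2)] else ts ++ [p]
  | none => [p]

def task9153_alt (sentence : String) : Int :=
  let dups := bFinish (sentence.toList.foldl bStep ([], none, 0))
  let dupsS := PySem.List.sorted2 dups (fun p => p.1) (fun p => p.2)
  let totals := dupsS.foldl tStep []
  -- max(k for _, k in totals); none = ValueError, excluded by Pre_
  match PySem.List.max? (totals.map Prod.snd) (fun v => v) with
  | some v => v + 1
  | none => 0

-- ===== PRECONDITION & SPEC =====
-- Pre_ excludes exactly the inputs with no consecutive duplicate character (among them empty and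
-- one-char sentences), where both A and B raise ValueError (max() of an empty collection).
def Pre_task9153 (sentence : String) : Prop :=
  ∃ pr ∈ sentence.toList.zip (sentence.toList.drop 1), pr.1 = pr.2
instance (sentence : String) : Decidable (Pre_task9153 sentence) := by unfold Pre_task9153; infer_instance

def pvWitness_task9153 : String := "aabbb"

def Spec_task9153 (sentence : String) (out : Int) : Prop := out = task9153_alt sentence
instance (sentence : String) (out : Int) : Decidable (Spec_task9153 sentence out) := by unfold Spec_task9153; infer_instance

-- ===== CLAIM (what is proved, stated in full; the proofs are below) =====
def Claim_equal_task9153 : Prop := ∀ (sentence : String), Dom_task9153 sentence → Pre_task9153 sentence → Spec_task9153 sentence (task9153 sentence)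

-- ===== LEMMAS AND PROOFS =====

-- the duplicated-character list A builds: one character per adjacent equal pair
def dupsOf (l : List Char) : List Char :=
  ((l.zip (l.drop 1)).filter (fun pr => pr.1 == pr.2)).map Prod.snd
def rleFrom (c : Char) (k : Int) : List Char → List (Char × Int)
  | [] => if 0 < k then [(c, k)] else []
  | x :: t => if c == x then rleFrom c (k + 1) t
              else (if 0 < k then [(c, k)] else []) ++ rleFrom x 0 t
def sweep (c : Char) (s : Int) : List (Char × Int) → List (Char × Int)
  | [] => [(c, s)]
  | p :: t => if c == p.1 then sweep c (s + p.2) t else (c, s) :: sweep p.1 p.2 t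
def sumFor (c' : Char) (l : List (Char × Int)) : Int :=
  ((l.filter (fun p => p.1 == c')).map Prod.snd).sum
def RleLe (p q : Char × Int) : Prop := p.1 < q.1 ∨ (p.1 = q.1 ∧ p.2 ≤ q.2)


lemma bFoldl_eq (l : List Char) : ∀ (d : List (Char × Int)) (c : Char) (k : Int),
    bFinish (l.foldl bStep (d, some c, k)) = d ++ rleFrom c k l := by
  induction l with
  | nil => intro d c k; simp [bFinish, rleFrom]; split_ifs <;> simp
  | cons x t ih =>
    intro d c k
    by_cases h : c = x
    · simp [List.foldl_cons, bStep, h, ih, rleFrom]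
    · simp only [List.foldl_cons, bStep]
      have : (some c == some x) = false := by simp [h]
      rw [this]
      simp only [Bool.false_eq_true, if_false]
      rw [ih]
      simp [rleFrom, h]
      split_ifs <;> simp

lemma dupsOf_cons (a b : Char) (t : List Char) :
    dupsOf (a :: b :: t) = (if a == b then [b] else []) ++ dupsOf (b :: t) := by
  simp [dupsOf, List.filter_cons]
  split_ifs <;> simp

lemma rle_flatMap (l : List Char) : ∀ (c : Char) (k : Int), 0 ≤ k →
    (rleFrom c k l).flatMap (fun p => List.replicate p.2.toNat p.1)
      = List.replicate k.toNat c ++ dupsOf (c :: l) := by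
  induction l with
  | nil =>
    intro c k hk
    simp [rleFrom, dupsOf]
    split_ifs with h
    · simp
    · have : k = 0 := by omega
      simp [this]
  | cons x t ih =>
    intro c k hk
    by_cases h : c = x
    · rw [dupsOf_cons]
      simp only [rleFrom, h, BEq.rfl, if_true]
      rw [ih x (k+1) (by omega)]
      have h1 : (k+1).toNat = k.toNat + 1 := by omega
      simp [h1, List.replicate_succ']
    · rw [dupsOf_cons]
      have hb : (c == x) = false := by simp [h]
      simp only [rleFrom, hb, Bool.false_eq_true, if_false, List.flatMap_append]
      rw [ih x 0 le_rfl]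
      simp
      split_ifs with h2
      · simp
      · have : k = 0 := by omega
        simp [this]

lemma rle_pos (l : List Char) : ∀ (c : Char) (k : Int) (p : Char × Int),
    p ∈ rleFrom c k l → 0 < p.2 := by
  induction l with
  | nil =>
    intro c k p hp
    simp only [rleFrom] at hp
    split_ifs at hp with h
    · simp at hp; rw [hp]; exact h
    · simp at hp
  | cons x t ih =>
    intro c k p hp
    simp only [rleFrom] at hp
    split_ifs at hp with h1 h2
    · exact ih c (k+1) p hp
    · rw [List.mem_append] at hp
      rcases hp with hp | hp
      · simp at hp; rw [hp]; exact h2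
      · exact ih x 0 p hp
    · rw [List.nil_append] at hp
      exact ih x 0 p hp

lemma sumFor_cons (p : Char × Int) (t : List (Char × Int)) (c' : Char) :
    sumFor c' (p :: t) = (if p.1 = c' then p.2 else 0) + sumFor c' t := by
  simp [sumFor, List.filter_cons]
  by_cases h : p.1 = c' <;> simp [h]

lemma sumFor_eq_zero (l : List (Char × Int)) (c' : Char) (h : ∀ p ∈ l, p.1 ≠ c') :
    sumFor c' l = 0 := by
  have : l.filter (fun p => p.1 == c') = [] := by
    rw [List.filter_eq_nil_iff]
    intro p hp
    simp [h p hp]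
  simp [sumFor, this]

lemma count_flatMap_replicate (dups : List (Char × Int)) (hpos : ∀ p ∈ dups, 0 < p.2) (c' : Char) :
    ((dups.flatMap (fun p => List.replicate p.2.toNat p.1)).count c' : Int) = sumFor c' dups := by
  induction dups with
  | nil => simp [sumFor]
  | cons p t ih =>
    have hp := hpos p (by simp)
    rw [List.flatMap_cons, List.count_append, sumFor_cons]
    have ht := ih (fun q hq => hpos q (by simp [hq]))
    rw [List.count_replicate]
    push_cast
    rw [ht]
    by_cases h : p.1 = c' <;> simp [h]
    omega

lemma mem_flatMap_replicate (dups : List (Char × Int)) (hpos : ∀ p ∈ dups, 0 < p.2) (c' : Char) :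
    c' ∈ dups.flatMap (fun p => List.replicate p.2.toNat p.1) ↔ ∃ p ∈ dups, p.1 = c' := by
  rw [List.mem_flatMap]
  constructor
  · rintro ⟨p, hp, hmem⟩
    rw [List.mem_replicate] at hmem
    exact ⟨p, hp, hmem.2.symm⟩
  · rintro ⟨p, hp, heq⟩
    refine ⟨p, hp, ?_⟩
    rw [List.mem_replicate]
    have := hpos p hp
    exact ⟨by omega, heq.symm⟩

lemma rleLe_trans {p q r : Char × Int} (h1 : RleLe p q) (h2 : RleLe q r) : RleLe p r := by
  unfold RleLe at *
  rcases h1 with h1 | ⟨h1, h1'⟩ <;> rcases h2 with h2 | ⟨h2, h2'⟩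
  · exact Or.inl (lt_trans h1 h2)
  · exact Or.inl (h2 ▸ h1)
  · exact Or.inl (h1 ▸ h2)
  · exact Or.inr ⟨h1.trans h2, le_trans h1' h2'⟩

lemma insertBy_pairwise (x : Char × Int) (ys : List (Char × Int)) (h : ys.Pairwise RleLe) :
    (PySem.List.insertBy
      (fun a b => decide (a.1 < b.1) || (!decide (b.1 < a.1) && decide (a.2 < b.2)))
      x ys).Pairwise RleLe := by
  induction ys with
  | nil => simp [PySem.List.insertBy]
  | cons y ys ih =>
    rw [List.pairwise_cons] at h
    obtain ⟨h1, h2⟩ := h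
    simp only [PySem.List.insertBy]
    split_ifs with hb
    · -- x goes first
      simp only [Bool.or_eq_true, Bool.and_eq_true, Bool.not_eq_true', decide_eq_true_eq,
        decide_eq_false_iff_not] at hb
      have hxy : RleLe x y := by
        rcases hb with hb | ⟨hb, hb'⟩
        · exact Or.inl hb
        · rcases lt_or_eq_of_le (le_of_not_gt hb) with h' | h'
          · exact Or.inl h'
          · exact Or.inr ⟨h', le_of_lt hb'⟩
      refine List.pairwise_cons.mpr ⟨?_, List.pairwise_cons.mpr ⟨h1, h2⟩⟩
      intro z hz
      rcases List.mem_cons.mp hz with hz | hz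
      · exact hz ▸ hxy
      · exact rleLe_trans hxy (h1 z hz)
    · -- y stays first
      have hyx : RleLe y x := by
        by_cases hxy1 : x.1 < y.1
        · exact absurd (by simp [hxy1]) hb
        · by_cases hyx1 : y.1 < x.1
          · exact Or.inl hyx1
          · have he : y.1 = x.1 := le_antisymm (not_lt.mp hxy1) (not_lt.mp hyx1)
            by_cases hlt : x.2 < y.2
            · exact absurd (by simp [hyx1, hlt]) hb
            · exact Or.inr ⟨he, not_lt.mp hlt⟩
      refine List.pairwise_cons.mpr ⟨?_, ih h2⟩
      intro z hz
      rcases (PySem.List.mem_insertBy _ x z ys).mp hz with hz | hz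
      · exact hz ▸ hyx
      · exact h1 z hz

lemma sorted2_pairwise_rleLe (dups : List (Char × Int)) :
    (PySem.List.sorted2 dups (fun p => p.1) (fun p => p.2)).Pairwise RleLe := by
  have main : ∀ (l acc : List (Char × Int)), acc.Pairwise RleLe →
      (l.foldl (fun acc x => PySem.List.insertBy
        (fun a b => decide (a.1 < b.1) || (!decide (b.1 < a.1) && decide (a.2 < b.2))) x acc)
        acc).Pairwise RleLe := by
    intro l
    induction l with
    | nil => intro acc h; exact h
    | cons x t ih => intro acc h; exact ih _ (insertBy_pairwise x acc h)
  exact main dups [] List.Pairwise.nil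

lemma foldl_tStep_eq (l : List (Char × Int)) : ∀ (g : List (Char × Int)) (c : Char) (s : Int),
    l.foldl tStep (g ++ [(c, s)]) = g ++ sweep c s l := by
  induction l with
  | nil => intro g c s; simp [sweep]
  | cons p t ih =>
    intro g c s
    rw [List.foldl_cons]
    have hlast : (g ++ [(c, s)]).getLast? = some (c, s) := by simp
    by_cases h : c = p.1
    · have : tStep (g ++ [(c, s)]) p = g ++ [(p.1, s + p.2)] := by
        simp [tStep, h]
      rw [this, ih g p.1 (s + p.2)]
      simp [sweep, h]
    · have : tStep (g ++ [(c, s)]) p = (g ++ [(c, s)]) ++ [(p.1, p.2)] := by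
        simp [tStep, hlast, h]
      rw [this, ih (g ++ [(c, s)]) p.1 p.2]
      simp [sweep, h]

lemma mem_map_fst_sweep (l : List (Char × Int)) : ∀ (c : Char) (s : Int) (c' : Char),
    c' ∈ (sweep c s l).map Prod.fst ↔ c' = c ∨ c' ∈ l.map Prod.fst := by
  induction l with
  | nil => intro c s c'; simp [sweep]
  | cons p t ih =>
    intro c s c'
    by_cases h : c = p.1
    · simp [sweep, h, ih]
    · have hb : (c == p.1) = false := by simp [h]
      simp [sweep, hb, ih]

lemma sweep_values (l : List (Char × Int)) : ∀ (c : Char) (s : Int),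
    l.Pairwise (fun a b => a.1 ≤ b.1) → (∀ q ∈ l, c ≤ q.1) →
    ∀ p ∈ sweep c s l, p.2 = (if p.1 = c then s else 0) + sumFor p.1 l := by
  induction l with
  | nil =>
    intro c s _ _ p hp
    simp [sweep] at hp
    rw [hp]
    simp [sumFor]
  | cons q t ih =>
    intro c s hpw hc p hp
    rw [List.pairwise_cons] at hpw
    obtain ⟨hq, ht⟩ := hpw
    by_cases h : c = q.1
    · rw [show sweep c s (q :: t) = sweep c (s + q.2) t by simp [sweep, h]] at hp
      have := ih c (s + q.2) ht (fun z hz => h ▸ hq z hz) p hp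
      rw [this, sumFor_cons]
      by_cases h2 : p.1 = c
      · rw [if_pos h2, if_pos h2, if_pos (by rw [h2, h])]
        ring
      · rw [if_neg h2, if_neg h2, if_neg (by rw [← h]; exact fun he => h2 he.symm)]
        ring
    · have hclt : c < q.1 := lt_of_le_of_ne (hc q (by simp)) h
      rw [show sweep c s (q :: t) = (c, s) :: sweep q.1 q.2 t by simp [sweep, h]] at hp
      rcases List.mem_cons.mp hp with hp | hp
      · rw [hp]
        have hz : sumFor c (q :: t) = 0 := by
          apply sumFor_eq_zero
          intro z hz
          rcases List.mem_cons.mp hz with hz | hz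
          · rw [hz]; exact fun he => absurd (he ▸ hclt) (lt_irrefl _)
          · have := hq z hz
            exact fun he => absurd (he ▸ (lt_of_lt_of_le hclt this)) (lt_irrefl _)
        simp [hz]
      · have hmem : p.1 = q.1 ∨ p.1 ∈ t.map Prod.fst :=
          (mem_map_fst_sweep t q.1 q.2 p.1).mp (List.mem_map_of_mem hp)
        have hne : p.1 ≠ c := by
          rcases hmem with hm | hm
          · exact fun he => absurd (he ▸ hm ▸ hclt) (lt_irrefl _)
          · obtain ⟨z, hz, hz'⟩ := List.mem_map.mp hm
            have := lt_of_lt_of_le hclt (hq z hz)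
            exact fun he => absurd (he ▸ hz' ▸ this) (lt_irrefl _)
        have := ih q.1 q.2 ht (fun z hz => hq z hz) p hp
        rw [this, sumFor_cons, if_neg hne]
        by_cases h2 : p.1 = q.1
        · rw [if_pos h2, if_pos (h2.symm)]
          ring
        · rw [if_neg h2, if_neg (fun he => h2 he.symm)]
          ring

lemma sumFor_perm {l l' : List (Char × Int)} (h : l.Perm l') (c' : Char) :
    sumFor c' l = sumFor c' l' := by
  unfold sumFor
  exact ((h.filter _).map _).sum_eq


-- ===== VERDICT (by name: the statement is the Claim_ definition above) =====
theorem task9153_spec : Claim_equal_task9153 := by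
  intro sentence _ hpre
  unfold Spec_task9153 task9153 task9153_alt
  unfold Pre_task9153 at hpre
  have hslice : PySem.List.slice sentence.toList (some 1) none = sentence.toList.drop 1 := by
    simp [pysem]
  simp only [hslice]
  set l := sentence.toList with hl
  -- A's repeat list is dupsOf l
  have hrepA : (l.zip (l.drop 1)).foldl
      (fun acc pr => if pr.1 == pr.2 then acc ++ [pr.2] else acc) ([] : List Char) = dupsOf l := by
    rw [PySem.List.foldl_append_if (fun pr => pr.1 == pr.2) Prod.snd]
    simp [dupsOf]
  simp only [hrepA]
  -- rep is nonempty; in particular l has at least two characters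
  obtain ⟨pr, hprmem, hpreq⟩ := hpre
  have hrepne : dupsOf l ≠ [] := by
    intro hnil
    have : pr.2 ∈ dupsOf l :=
      List.mem_map_of_mem (List.mem_filter.mpr ⟨hprmem, by simp [hpreq]⟩)
    rw [hnil] at this
    cases this
  obtain ⟨x, t, hxt⟩ : ∃ x t, l = x :: t := by
    cases hcase : l with
    | nil => rw [hcase] at hrepne; simp [dupsOf] at hrepne
    | cons a b => exact ⟨a, b, rfl⟩
  -- B's dups list is rleFrom x 0 t
  have hdups : bFinish (l.foldl bStep ([], none, 0)) = rleFrom x 0 t := by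
    rw [hxt, List.foldl_cons]
    have h1 : bStep ([], none, 0) x = ([], some x, 0) := by simp [bStep]
    rw [h1, bFoldl_eq t [] x 0, List.nil_append]
  set dups := rleFrom x 0 t with hdupsdef
  have hpos : ∀ p ∈ dups, 0 < p.2 := fun p hp => rle_pos t x 0 p hp
  have hflat : dups.flatMap (fun p => List.replicate p.2.toNat p.1) = dupsOf l := by
    rw [hdupsdef, rle_flatMap t x 0 le_rfl, hxt]
    simp
  have F1 : ∀ c', ((dupsOf l).count c' : Int) = sumFor c' dups := by
    intro c'
    rw [← hflat]
    exact count_flatMap_replicate dups hpos c'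
  have F2 : ∀ c', c' ∈ dupsOf l ↔ ∃ p ∈ dups, p.1 = c' := by
    intro c'
    rw [← hflat]
    exact mem_flatMap_replicate dups hpos c'
  rw [hdups]
  set dupsS := PySem.List.sorted2 dups (fun p => p.1) (fun p => p.2) with hdupsS
  have hperm : dupsS.Perm dups := PySem.List.sorted2_perm dups _ _ false
  have hPW : dupsS.Pairwise (fun a b => a.1 ≤ b.1) :=
    (sorted2_pairwise_rleLe dups).imp (fun h => by
      rcases h with h | ⟨h, _⟩
      · exact le_of_lt h
      · exact le_of_eq h)
  have hdupsne : dups ≠ [] := by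
    intro hnil
    rw [hnil] at hflat
    simp at hflat
    exact hrepne hflat
  obtain ⟨p0, t0, hp0⟩ : ∃ p0 t0, dupsS = p0 :: t0 := by
    cases hcase : dupsS with
    | nil => rw [hcase] at hperm; exact absurd hperm.symm.eq_nil hdupsne
    | cons a b => exact ⟨a, b, rfl⟩
  -- B's totals list is sweep p0.1 p0.2 t0
  have htotals : dupsS.foldl tStep [] = sweep p0.1 p0.2 t0 := by
    rw [hp0, List.foldl_cons]
    have h1 : tStep [] p0 = [] ++ [(p0.1, p0.2)] := by simp [tStep]
    rw [h1, foldl_tStep_eq t0 [] p0.1 p0.2, List.nil_append]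
  rw [htotals]
  set totals := sweep p0.1 p0.2 t0 with htotalsdef
  rw [hp0] at hPW
  rw [List.pairwise_cons] at hPW
  obtain ⟨hq0, ht0pw⟩ := hPW
  -- value of each totals entry
  have T1 : ∀ q ∈ totals, q.2 = ((dupsOf l).count q.1 : Int) := by
    intro q hq
    have := sweep_values t0 p0.1 p0.2 ht0pw hq0 q hq
    rw [this]
    have : (if q.1 = p0.1 then p0.2 else 0) + sumFor q.1 t0 = sumFor q.1 (p0 :: t0) := by
      rw [sumFor_cons]
      by_cases h2 : q.1 = p0.1
      · rw [if_pos h2, if_pos h2.symm]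
      · rw [if_neg h2, if_neg (fun he => h2 he.symm)]
    rw [this, ← hp0, sumFor_perm hperm, F1]
  -- membership in totals ↔ membership in dupsOf l
  have T2 : ∀ c', c' ∈ totals.map Prod.fst ↔ c' ∈ dupsOf l := by
    intro c'
    rw [htotalsdef, mem_map_fst_sweep t0 p0.1 p0.2 c', F2]
    have : (c' = p0.1 ∨ c' ∈ t0.map Prod.fst) ↔ c' ∈ dupsS.map Prod.fst := by
      rw [hp0]
      simp [eq_comm]
    rw [this]
    constructor
    · intro h
      obtain ⟨p, hp, hp'⟩ := List.mem_map.mp h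
      exact ⟨p, (hperm.mem_iff).mp hp, hp'⟩
    · rintro ⟨p, hp, hp'⟩
      exact List.mem_map.mpr ⟨p, (hperm.mem_iff).mpr hp, hp'⟩
  have htotne : totals ≠ [] := by
    intro hnil
    have : p0.1 ∈ totals.map Prod.fst := (mem_map_fst_sweep t0 p0.1 p0.2 p0.1).mpr (Or.inl rfl)
    rw [hnil] at this
    cases this
  -- both maxes exist and agree
  rcases hmxA : PySem.List.max? (PySem.Set.ofList (dupsOf l)) (fun c => ((dupsOf l).count c : Int))
      with _ | r
  · exfalso
    rw [PySem.List.max?_eq_none_iff] at hmxA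
    obtain ⟨y, hy⟩ := List.exists_mem_of_ne_nil _ hrepne
    have : y ∈ PySem.Set.ofList (dupsOf l) := (PySem.Set.mem_ofList _ y).mpr hy
    rw [hmxA] at this
    cases this
  rcases hmxB : PySem.List.max? (totals.map Prod.snd) (fun v => v) with _ | v
  · exfalso
    rw [PySem.List.max?_eq_none_iff] at hmxB
    rcases htotalscase : totals with _ | ⟨q, ts⟩
    · exact htotne htotalscase
    · rw [htotalscase] at hmxB
      simp at hmxB
  · -- show count r = v
    have hvle : v ≤ ((dupsOf l).count r : Int) := by
      obtain ⟨q, hq, hq'⟩ := List.mem_map.mp (PySem.List.max?_mem hmxB)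
      have hval := T1 q hq
      have hmem : q.1 ∈ PySem.Set.ofList (dupsOf l) :=
        (PySem.Set.mem_ofList _ _).mpr ((T2 q.1).mp (List.mem_map_of_mem hq))
      have := PySem.List.max?_isMax hmxA q.1 hmem
      simp only at this
      omega
    have hler : ((dupsOf l).count r : Int) ≤ v := by
      have hrrep : r ∈ dupsOf l := (PySem.Set.mem_ofList _ _).mp (PySem.List.max?_mem hmxA)
      obtain ⟨q, hq, hq'⟩ := List.mem_map.mp ((T2 r).mpr hrrep)
      have hval := T1 q hq
      have : ((dupsOf l).count r : Int) ∈ totals.map Prod.snd := by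
        refine List.mem_map.mpr ⟨q, hq, ?_⟩
        rw [hval, hq']
      have := PySem.List.max?_isMax hmxB _ this
      simpa using this
    show ((dupsOf l).count r : Int) + 1 = v + 1
    omega
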